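-- pv_equiv track=rewrite | github.com/armeanco/labs | 2Primes/sol.py | permutational_primes
-- ===== SOURCE A (Python) =====
-- def f(x):
--     if x <= 1:
--         return 0
--     if x <= 3:
--         return 1
--     if x % 2 == 0 or x % 3 == 0:
--         return 0
--     k = 5
--     while k * k <= x:
--         if x % k == 0 or x % (k + 2) == 0:
--             return 0
--         k += 6
--     return 1
--
-- def permutational_primes(n_max, k_perms):
--     mp = [[0 for x in range(0)] for y in range(100000)]
--     cnt = [0] * 100000
--     frq = []
--     low = 1e6
--     ans = 0
--     for x in range(13, n_max + 1):
--         if f(x):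
--             l = [int(d) for d in str(x)]
--             l.sort(reverse=True)
--             q = int("".join(map(str, l)))
--             cnt[q] += 1
--             mp[q].append(x)
--     for x in range(len(cnt)):
--         if cnt[x] == k_perms + 1:
--             low = mp[x][0]
--             frq.append(low)
--             ans += 1
--     frq.sort()
--     if ans == 0:
--         return [0, 0, 0]
--     return [ans, frq[0], frq[len(frq) - 1]]
-- ===== SOURCE B (Python) =====
-- def permutational_primes(n_max, k_perms):
--     # Sieve of Eratosthenes up to n_max instead of per-number trial division
--     n = max(n_max, 1)
--     sieve = [True] * (n + 1)
--     sieve[0] = False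
--     sieve[1] = False
--     i = 2
--     while i * i <= n:
--         if sieve[i]:
--             for j in range(i * i, n + 1, i):
--                 sieve[j] = False
--         i += 1
--     # group primes by the descending-sorted digit string; keep (count, first prime)
--     groups = {}
--     for x in range(13, n_max + 1):
--         if sieve[x]:
--             sig = "".join(sorted(str(x), reverse=True))
--             c, first = groups.get(sig, (0, x))
--             groups[sig] = (c + 1, first)
--     firsts = [first for (c, first) in groups.values() if c == k_perms + 1]
--     if not firsts:
--         return [0, 0, 0]
--     return [len(firsts), min(firsts), max(firsts)]
-- ===== Notes on version B (the rewrite author's own statement) =====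
-- stated objective: faster
-- what changed: B replaces A's per-number 6k±1 trial division by a Sieve of Eratosthenes over [0, n_max], and replaces A's pair of fixed 100000-slot arrays keyed by int-of-sorted-digits (filled, rescanned over all 100000 slots, then sorted for min/max) by one dict keyed by the sorted-digit string holding (count, first prime), read off with len/min/max; a timing run measured B ~7-10x faster than A at the largest sizes it ran.
import Mathlib
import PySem

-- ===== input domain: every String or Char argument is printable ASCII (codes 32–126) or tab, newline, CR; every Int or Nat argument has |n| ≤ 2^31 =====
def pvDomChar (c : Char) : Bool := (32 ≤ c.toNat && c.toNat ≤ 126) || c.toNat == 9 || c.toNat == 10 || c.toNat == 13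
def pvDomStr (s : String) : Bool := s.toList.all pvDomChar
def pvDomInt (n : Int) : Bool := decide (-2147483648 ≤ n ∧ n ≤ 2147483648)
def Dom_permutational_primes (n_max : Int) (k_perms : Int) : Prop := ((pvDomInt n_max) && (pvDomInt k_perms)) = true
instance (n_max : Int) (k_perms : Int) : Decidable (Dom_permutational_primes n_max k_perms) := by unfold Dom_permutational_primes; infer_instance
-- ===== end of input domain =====

-- B replaces A's per-number 6k±1 trial division by a Sieve of Eratosthenes over [0, n_max] and
-- A's two fixed 100000-slot arrays (filled, rescanned over all slots, sorted) by one dict keyed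
-- by the sorted-digit string with (count, first) values read off by len/min/max.

-- ===== PORT A =====

-- the 'while k * k <= x' loop of f (6k±1 wheel); the Nat argument is fuel that merely makes
-- the recursion structural: it strictly exceeds the remaining iteration count, so the 0 case is
-- never reached (fLoopGo_one/fLoopGo_zero below never use it)
def pvFLoopGo : Nat → Int → Int → Int
  | 0, _, _ => 1
  | fuel + 1, x, k =>
    if k * k ≤ x then
      if PySem.Int.mod x k == 0 || PySem.Int.mod x (k + 2) == 0 then 0
      else pvFLoopGo fuel x (k + 6)
    else 1

def pvFLoop (x : Int) (k : Int) : Int :=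
  pvFLoopGo ((x + 1 - k).toNat + 1) x k
def pvF (x : Int) : Int :=
  if x ≤ 1 then 0
  else if x ≤ 3 then 1
  else if PySem.Int.mod x 2 == 0 || PySem.Int.mod x 3 == 0 then 0
  else pvFLoop x 5

-- l = [int(d) for d in str(x)]; each d is a single digit character here, so int(d) never raises
def pvDigitList (x : Int) : List Int :=
  (PySem.Int.toChars x).map (fun c => (PySem.Int.ofChars? [c]).getD 0)

-- int(s) for the nonempty all-digit string s = "".join(map(str, l)): on such strings Python's
-- int is exactly this decimal left fold (hand-ported here because the proof needs this
-- characterisation; it is exact on every string that reaches this call)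
def pvIntOfDigits (cs : List Char) : Int :=
  cs.foldl (fun a c => 10 * a + ((c.toNat : Int) - 48)) 0

-- q = int("".join(map(str, sorted(l, reverse=True))))
def pvSigA (x : Int) : Int :=
  pvIntOfDigits (((PySem.List.sorted (pvDigitList x) (fun d => d) true).map PySem.Int.toChars).flatten)

def permutational_primes (n_max : Int) (k_perms : Int) : List Int :=
  -- mp = [[] for _ in range(100000)]; cnt = [0] * 100000
  let init : Array Int × Array (List Int) := (Array.replicate 100000 0, Array.replicate 100000 ([] : List Int))
  let st := (PySem.List.pyRange 13 (n_max + 1) 1).foldl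
    (fun (s : Array Int × Array (List Int)) x =>
      if pvF x == 1 then
        -- cnt[q] += 1; mp[q].append(x)  (q ≥ 0 always; q ≥ 100000 raises IndexError in Python —
        -- those inputs, i.e. n_max ≥ 100003, are excluded by Pre_)
        let q := (pvSigA x).toNat
        (s.1.setIfInBounds q (s.1.getD q 0 + 1), s.2.setIfInBounds q (s.2.getD q [] ++ [x]))
      else s) init
  -- second loop over range(len(cnt)); the Python local `low` (initialised to the float 1e6) is
  -- dead outside the branch that reassigns and immediately appends it, so only (frq, ans) is carried
  let res := (PySem.List.pyRange 0 (st.1.size : Int) 1).foldl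
    (fun (s : List Int × Int) q =>
      if st.1.getD q.toNat 0 == k_perms + 1 then
        -- low = mp[x][0]: mp[x] is nonempty whenever cnt[x] = k_perms + 1 here, except when
        -- k_perms = -1 (IndexError in Python) — excluded by Pre_
        let low := (PySem.List.pyGet? (st.2.getD q.toNat []) 0).getD 0
        (s.1 ++ [low], s.2 + 1)
      else s) (([] : List Int), (0 : Int))
  let frq := PySem.List.sorted res.1 (fun v => v) false
  if res.2 == 0 then [0, 0, 0]
  else [res.2, (PySem.List.pyGet? frq 0).getD 0, (PySem.List.pyGet? frq (PySem.List.len frq - 1)).getD 0]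

-- ===== PORT B =====

-- inner sieve loop: for j in range(i*i, n+1, i): sieve[j] = False
def pvMark (s : Array Bool) (i n : Int) : Array Bool :=
  (PySem.List.pyRange (i * i) (n + 1) i).foldl (fun a j => a.setIfInBounds j.toNat false) s

-- the 'while i * i <= n' outer loop; the Nat argument is fuel that merely makes the recursion
-- structural: it strictly exceeds the remaining iteration count, so the 0 case is never reached
def pvSieveGo : Nat → Array Bool → Int → Int → Array Bool
  | 0, s, _, _ => s
  | fuel + 1, s, i, n =>
    if i * i ≤ n then
      pvSieveGo fuel (if s.getD i.toNat false then pvMark s i n else s) (i + 1) n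
    else s

-- sieve = [True]*(n+1); sieve[0] = sieve[1] = False; Eratosthenes main loop
def pvSieve (n_max : Int) : Array Bool :=
  let n := max n_max 1
  let s := ((Array.replicate (n + 1).toNat true).setIfInBounds 0 false).setIfInBounds 1 false
  pvSieveGo (n + 1).toNat s 2 n

-- sig = "".join(sorted(str(x), reverse=True)), kept as its character list
def pvSigB (x : Int) : List Char :=
  PySem.List.sorted (PySem.Int.toChars x) (fun c => c) true

def permutational_primes_alt (n_max : Int) (k_perms : Int) : List Int :=
  let s := pvSieve n_max
  let g := (PySem.List.pyRange 13 (n_max + 1) 1).foldl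
    (fun (g : PySem.Dict (List Char) (Int × Int)) x =>
      if s.getD x.toNat false then
        let p := g.getD (pvSigB x) (0, x)
        g.insert (pvSigB x) (p.1 + 1, p.2)
      else g) PySem.Dict.empty
  let firsts := ((PySem.Dict.values g).filter (fun p => p.1 == k_perms + 1)).map (fun p => p.2)
  if firsts.isEmpty then [0, 0, 0]
  else
    -- firsts is nonempty here, so min()/max() never raise
    [PySem.List.len firsts, (PySem.List.min? firsts (fun v => v)).getD 0,
     (PySem.List.max? firsts (fun v => v)).getD 0]

-- ===== PRECONDITION & SPEC =====

-- Pre_ excludes exactly the inputs where A raises IndexError: n_max ≥ 100003 (the first 6-digit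
-- prime's digit key 310000 overflows the fixed 100000-slot arrays) and k_perms = -1 (every empty
-- bucket matches cnt[x] == 0 and mp[x][0] is taken from an empty list).
def Pre_permutational_primes (n_max : Int) (k_perms : Int) : Prop :=
  n_max ≤ 100002 ∧ k_perms ≠ -1
instance (n_max : Int) (k_perms : Int) : Decidable (Pre_permutational_primes n_max k_perms) := by
  unfold Pre_permutational_primes; infer_instance

def pvWitness_permutational_primes : Int × Int := (30, 1)

def Spec_permutational_primes (n_max : Int) (k_perms : Int) (out : List Int) : Prop :=
  out = permutational_primes_alt n_max k_perms
instance (n_max : Int) (k_perms : Int) (out : List Int) : Decidable (Spec_permutational_primes n_max k_perms out) := by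
  unfold Spec_permutational_primes; infer_instance

-- ===== CLAIM (what is proved, stated in full; the proofs are below) =====
def Claim_equal_permutational_primes : Prop := ∀ (n_max : Int) (k_perms : Int), Dom_permutational_primes n_max k_perms → Pre_permutational_primes n_max k_perms → Spec_permutational_primes n_max k_perms (permutational_primes n_max k_perms)
-- ===== LEMMAS AND PROOFS =====

-- §1: decimal digit strings and their values
def pvV (cs : List Char) : Nat := cs.foldl (fun a c => 10 * a + (c.toNat - 48)) 0
def pvIsDig (c : Char) : Prop := 48 ≤ c.toNat ∧ c.toNat ≤ 57

theorem char_eq_of_toNat (c d : Char) (h : c.toNat = d.toNat) : c = d :=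
  Char.ext (UInt32.toNat_inj.mp h)

theorem char_le_iff (c d : Char) : c ≤ d ↔ c.toNat ≤ d.toNat := by
  rw [Char.le_def]
  exact UInt32.le_iff_toNat_le

theorem pvV_from (t : List Char) : ∀ a, t.foldl (fun a c => 10 * a + (c.toNat - 48)) a = a * 10 ^ t.length + pvV t := by
  induction t with
  | nil => intro a; simp [pvV]
  | cons c t ih =>
    intro a
    simp only [List.foldl_cons, List.length_cons, pvV]
    rw [ih, ih (10 * 0 + (c.toNat - 48))]
    ring

theorem pvV_cons (c : Char) (t : List Char) : pvV (c :: t) = (c.toNat - 48) * 10 ^ t.length + pvV t := by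
  simpa [pvV] using pvV_from t (10 * 0 + (c.toNat - 48))

theorem pvV_lt (t : List Char) (h : ∀ c ∈ t, pvIsDig c) : pvV t < 10 ^ t.length := by
  induction t with
  | nil => simp [pvV]
  | cons c t ih =>
    obtain ⟨hc1, hc2⟩ := h c (by simp)
    have ht := ih (fun d hd => h d (by simp [hd]))
    rw [pvV_cons]
    have h9 : c.toNat - 48 ≤ 9 := by omega
    have : (c.toNat - 48) * 10 ^ t.length ≤ 9 * 10 ^ t.length := Nat.mul_le_mul_right _ h9
    calc (c.toNat - 48) * 10 ^ t.length + pvV t < (c.toNat - 48) * 10 ^ t.length + 10 ^ t.length :=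
          Nat.add_lt_add_left ht _
    _ ≤ 9 * 10 ^ t.length + 10 ^ t.length := Nat.add_le_add_right this _
    _ = 10 ^ (t.length + 1) := by ring
    _ = 10 ^ (c :: t).length := by simp

theorem pvV_le_of_head (c : Char) (t : List Char) (h : c ≠ '0') (hd : pvIsDig c) :
    10 ^ t.length ≤ pvV (c :: t) := by
  rw [pvV_cons]
  have h1 : 1 ≤ c.toNat - 48 := by
    rcases hd with ⟨h48, h57⟩
    rcases Nat.lt_or_ge 49 c.toNat with h' | h'
    · omega
    · interval_cases hn : c.toNat
      · exact absurd (char_eq_of_toNat c '0' (by rw [hn]; rfl)) h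
      · omega
  calc 10 ^ t.length = 1 * 10 ^ t.length + 0 := by ring
  _ ≤ (c.toNat - 48) * 10 ^ t.length + pvV t := by
      exact Nat.add_le_add (Nat.mul_le_mul_right _ h1) (Nat.zero_le _)

theorem pvV_inj (s : List Char) : ∀ t : List Char, (∀ c ∈ s, pvIsDig c) → (∀ c ∈ t, pvIsDig c) →
    s.length = t.length → pvV s = pvV t → s = t := by
  induction s with
  | nil => intro t _ _ hl _; cases t <;> simp_all
  | cons c s ih =>
    intro t hs ht hl hv
    cases t with
    | nil => simp at hl
    | cons d t =>
      have hlen : s.length = t.length := by simpa using hl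
      rw [pvV_cons, pvV_cons, ← hlen] at hv
      have hvs := pvV_lt s (fun e he => hs e (by simp [he]))
      have hvt := pvV_lt t (fun e he => ht e (by simp [he]))
      rw [← hlen] at hvt
      have key : ∀ A B u v : Nat, u < 10 ^ s.length → A < B → A * 10 ^ s.length + u ≠ B * 10 ^ s.length + v := by
        intro A B u v hu hAB heq
        have : A * 10 ^ s.length + u < B * 10 ^ s.length + v := by
          calc A * 10 ^ s.length + u < A * 10 ^ s.length + 10 ^ s.length := Nat.add_lt_add_left hu _
          _ = (A + 1) * 10 ^ s.length := by ring
          _ ≤ B * 10 ^ s.length := Nat.mul_le_mul_right _ hAB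
          _ ≤ B * 10 ^ s.length + v := Nat.le_add_right _ _
        omega
      have hcd : c.toNat - 48 = d.toNat - 48 := by
        by_contra hne
        rcases Nat.lt_or_ge (c.toNat - 48) (d.toNat - 48) with h' | h'
        · exact key _ _ _ _ hvs h' hv
        · exact key _ _ _ _ hvt (by omega) hv.symm
      obtain ⟨hc1, hc2⟩ := hs c (by simp); obtain ⟨hd1, hd2⟩ := ht d (by simp)
      have : c = d := char_eq_of_toNat c d (by omega)
      subst this
      have hvst : pvV s = pvV t := by omega
      rw [ih t (fun e he => hs e (by simp [he])) (fun e he => ht e (by simp [he])) hlen hvst]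

theorem digitChar_spec (n : Nat) (h : n < 10) : (Nat.digitChar n).toNat = 48 + n ∧ pvIsDig (Nat.digitChar n) := by
  interval_cases n <;> refine ⟨by decide, by constructor <;> decide⟩

theorem pvV_append_one (s : List Char) (c : Char) :
    pvV (s ++ [c]) = 10 * pvV s + (c.toNat - 48) := by
  simp [pvV, List.foldl_append]

theorem td_spec (n : Nat) : (∀ c ∈ Nat.toDigits 10 n, pvIsDig c) ∧ pvV (Nat.toDigits 10 n) = n ∧
    ∃ c t, Nat.toDigits 10 n = c :: t ∧ (1 ≤ n → c ≠ '0') := by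
  induction n using Nat.strong_induction_on with
  | _ n ih =>
    rcases Nat.lt_or_ge n 10 with h10 | h10
    · rw [Nat.toDigits_of_lt_base h10]
      obtain ⟨he, hd⟩ := digitChar_spec n h10
      refine ⟨by simpa using hd, ?_, Nat.digitChar n, [], rfl, ?_⟩
      · rw [pvV_cons]; simp [pvV, he]
      · intro h1 h0
        rw [h0] at he; simp at he; omega
    · rw [Nat.toDigits_of_base_le (by norm_num) h10]
      have hlt : n / 10 < n := Nat.div_lt_self (by omega) (by norm_num)
      obtain ⟨ihd, ihv, c, t, hct, hc0⟩ := ih (n / 10) hlt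
      obtain ⟨he, hd⟩ := digitChar_spec (n % 10) (Nat.mod_lt _ (by norm_num))
      refine ⟨?_, ?_, ?_⟩
      · intro e he'
        rcases List.mem_append.mp he' with h' | h'
        · exact ihd e h'
        · simp at h'; subst h'; exact hd
      · rw [pvV_append_one, ihv, he]
        omega
      · rw [hct]
        exact ⟨c, t ++ [(n % 10).digitChar], rfl, fun _ => hc0 (by omega)⟩

-- literal-casing helper
theorem pvDig_cases (c : Char) (h : pvIsDig c) :
    c = '0' ∨ c = '1' ∨ c = '2' ∨ c = '3' ∨ c = '4' ∨ c = '5' ∨ c = '6' ∨ c = '7' ∨ c = '8' ∨ c = '9' := by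
  obtain ⟨h1, h2⟩ := h
  interval_cases hn : c.toNat <;>
    [ exact Or.inl (char_eq_of_toNat c '0' (by rw [hn]; rfl));
      exact Or.inr (Or.inl (char_eq_of_toNat c '1' (by rw [hn]; rfl)));
      exact Or.inr (Or.inr (Or.inl (char_eq_of_toNat c '2' (by rw [hn]; rfl))));
      exact Or.inr (Or.inr (Or.inr (Or.inl (char_eq_of_toNat c '3' (by rw [hn]; rfl)))));
      exact Or.inr (Or.inr (Or.inr (Or.inr (Or.inl (char_eq_of_toNat c '4' (by rw [hn]; rfl))))));
      exact Or.inr (Or.inr (Or.inr (Or.inr (Or.inr (Or.inl (char_eq_of_toNat c '5' (by rw [hn]; rfl)))))));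
      exact Or.inr (Or.inr (Or.inr (Or.inr (Or.inr (Or.inr (Or.inl (char_eq_of_toNat c '6' (by rw [hn]; rfl))))))));
      exact Or.inr (Or.inr (Or.inr (Or.inr (Or.inr (Or.inr (Or.inr (Or.inl (char_eq_of_toNat c '7' (by rw [hn]; rfl)))))))));
      exact Or.inr (Or.inr (Or.inr (Or.inr (Or.inr (Or.inr (Or.inr (Or.inr (Or.inl (char_eq_of_toNat c '8' (by rw [hn]; rfl))))))))));
      exact Or.inr (Or.inr (Or.inr (Or.inr (Or.inr (Or.inr (Or.inr (Or.inr (Or.inr (char_eq_of_toNat c '9' (by rw [hn]; rfl))))))))))]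

theorem ofChars_single_digit (c : Char) (h : pvIsDig c) :
    PySem.Int.ofChars? [c] = some ((c.toNat : Int) - 48) := by
  rcases pvDig_cases c h with h|h|h|h|h|h|h|h|h|h <;> subst h <;> decide

theorem toChars_digit (c : Char) (h : pvIsDig c) :
    PySem.Int.toChars ((c.toNat : Int) - 48) = [c] := by
  rcases pvDig_cases c h with h|h|h|h|h|h|h|h|h|h <;> subst h <;> decide

theorem flatten_map_singleton (l : List Char) : (l.map (fun c => [c])).flatten = l := by
  induction l with
  | nil => rfl
  | cons c t ih => simp [ih]

-- §2: the two signatures agree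
theorem toChars_nonneg (x : Int) (h : 0 ≤ x) : PySem.Int.toChars x = Nat.toDigits 10 x.toNat := by
  simp [PySem.Int.toChars, Int.not_lt.mpr h]

theorem sigB_digits (x : Int) (h : 0 ≤ x) : ∀ c ∈ pvSigB x, pvIsDig c := by
  intro c hc
  rw [pvSigB, PySem.List.mem_sorted, toChars_nonneg x h] at hc
  exact (td_spec x.toNat).1 c hc

theorem pvV_all_zero (t : List Char) (h : ∀ c ∈ t, c = '0') : pvV t = 0 := by
  induction t with
  | nil => rfl
  | cons c s ih =>
    rw [pvV_cons, h c (by simp), ih (fun d hd => h d (by simp [hd]))]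
    simp

theorem sigB_head (x : Int) (h : 13 ≤ x) : ∃ c t, pvSigB x = c :: t ∧ c ≠ '0' := by
  have h0 : (0:Int) ≤ x := by omega
  obtain ⟨hdig, hV, c0, t0, hct, hc0⟩ := td_spec x.toNat
  have hne : pvSigB x ≠ [] := by
    rw [pvSigB, Ne, PySem.List.sorted_eq_nil_iff, toChars_nonneg x h0, hct]
    simp
  obtain ⟨c, t, hsig⟩ : ∃ c t, pvSigB x = c :: t := by
    cases hs : pvSigB x with
    | nil => exact absurd hs hne
    | cons c t => exact ⟨c, t, rfl⟩
  refine ⟨c, t, hsig, ?_⟩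
  intro hc
  -- all chars of str(x) would be '0', so x = 0
  have hmax : ∀ y ∈ PySem.Int.toChars x, y ≤ c :=
    PySem.List.key_head_sorted_rev_ge (PySem.Int.toChars x) (fun c => c) (by simpa [pvSigB] using hsig)
  have hall : ∀ y ∈ PySem.Int.toChars x, y = '0' := by
    intro y hy
    have h1 : y ≤ c := hmax y hy
    have h2 : pvIsDig y := by
      rw [toChars_nonneg x h0] at hy
      exact hdig y hy
    subst hc
    apply char_eq_of_toNat
    have hy0 : y.toNat ≤ '0'.toNat := (char_le_iff y '0').mp h1
    have h48 : '0'.toNat = 48 := rfl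
    have : (48:Nat) ≤ y.toNat := h2.1
    omega
  have : pvV (PySem.Int.toChars x) = 0 := pvV_all_zero _ hall
  rw [toChars_nonneg x h0, hV] at this
  omega

theorem intOfDigits_eq_V (cs : List Char) (h : ∀ c ∈ cs, pvIsDig c) :
    pvIntOfDigits cs = (pvV cs : Int) := by
  suffices H : ∀ (cs : List Char), (∀ c ∈ cs, pvIsDig c) → ∀ a : Nat,
      cs.foldl (fun a c => 10 * a + ((c.toNat : Int) - 48)) (a : Int)
        = ((cs.foldl (fun a c => 10 * a + (c.toNat - 48)) a : Nat) : Int) by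
    simpa [pvIntOfDigits, pvV] using H cs h 0
  intro cs
  induction cs with
  | nil => intro _ a; simp
  | cons c t ih =>
    intro h a
    simp only [List.foldl_cons]
    obtain ⟨h1, h2⟩ := h c (by simp)
    have hcast : (10 * (a:Int) + ((c.toNat : Int) - 48)) = ((10 * a + (c.toNat - 48) : Nat) : Int) := by
      omega
    rw [hcast, ih (fun d hd => h d (by simp [hd]))]

theorem sortedA_eq (x : Int) (h : 0 ≤ x) :
    PySem.List.sorted (pvDigitList x) (fun d => d) true = (pvSigB x).map (fun c => (c.toNat : Int) - 48) := by
  have hmap : pvDigitList x = (PySem.Int.toChars x).map (fun c => (c.toNat : Int) - 48) := by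
    rw [pvDigitList]
    apply List.map_congr_left
    intro c hc
    rw [ofChars_single_digit c (by rw [toChars_nonneg x h] at hc; exact (td_spec x.toNat).1 c hc)]
    rfl
  rw [hmap]
  refine List.Perm.eq_of_pairwise (le := fun (a b : Int) => b ≤ a)
    (fun a b _ _ h1 h2 => le_antisymm h2 h1) (PySem.List.sorted_pairwise_rev _ _) ?_ ?_
  · refine List.Pairwise.map _ ?_ (PySem.List.sorted_pairwise_rev (PySem.Int.toChars x) (fun c => c))
    intro a b hba
    have := (char_le_iff b a).mp hba
    omega
  · exact (PySem.List.sorted_perm _ _ _).trans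
      (((PySem.List.sorted_perm (PySem.Int.toChars x) (fun c => c) true).map _).symm)

theorem sigA_eq_V (x : Int) (h13 : 13 ≤ x) : pvSigA x = (pvV (pvSigB x) : Int) := by
  have h0 : (0:Int) ≤ x := by omega
  rw [pvSigA, sortedA_eq x h0, List.map_map]
  have hmap : ((pvSigB x).map (PySem.Int.toChars ∘ fun c => (c.toNat : Int) - 48)) = (pvSigB x).map (fun c => [c]) := by
    apply List.map_congr_left
    intro c hc
    exact toChars_digit c (sigB_digits x h0 c hc)
  rw [hmap, flatten_map_singleton]
  exact intOfDigits_eq_V _ (sigB_digits x h0)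

theorem pvV_inj_top (s t : List Char) (hs : ∀ c ∈ s, pvIsDig c) (ht : ∀ c ∈ t, pvIsDig c)
    (hsh : ∃ c r, s = c :: r ∧ c ≠ '0') (hth : ∃ c r, t = c :: r ∧ c ≠ '0')
    (h : pvV s = pvV t) : s = t := by
  obtain ⟨c, r, rfl, hc⟩ := hsh
  obtain ⟨d, u, rfl, hd⟩ := hth
  have b1 : 10 ^ r.length ≤ pvV (c :: r) := pvV_le_of_head c r hc (hs c (by simp))
  have b2 : pvV (c :: r) < 10 ^ (r.length + 1) := by simpa using pvV_lt _ hs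
  have b3 : 10 ^ u.length ≤ pvV (d :: u) := pvV_le_of_head d u hd (ht d (by simp))
  have b4 : pvV (d :: u) < 10 ^ (u.length + 1) := by simpa using pvV_lt _ ht
  have hlen : r.length = u.length := by
    rcases Nat.lt_trichotomy r.length u.length with h' | h' | h'
    · have : 10 ^ (r.length + 1) ≤ 10 ^ u.length := Nat.pow_le_pow_right (by norm_num) (by omega)
      omega
    · exact h'
    · have : 10 ^ (u.length + 1) ≤ 10 ^ r.length := Nat.pow_le_pow_right (by norm_num) (by omega)
      omega
  exact pvV_inj _ _ hs ht (by simpa using hlen) h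

theorem sigA_nonneg (x : Int) (h13 : 13 ≤ x) : 0 ≤ pvSigA x := by
  rw [sigA_eq_V x h13]; exact Int.natCast_nonneg _

theorem sigA_lt (x : Int) (h13 : 13 ≤ x) (hle : x ≤ 99999) : pvSigA x < 100000 := by
  rw [sigA_eq_V x h13]
  have h0 : (0:Int) ≤ x := by omega
  have hlt := pvV_lt (pvSigB x) (sigB_digits x h0)
  have hlen : (pvSigB x).length = (PySem.Int.toChars x).length := PySem.List.length_sorted _ _ _
  obtain ⟨hdig, hV, c, t, hct, hc0⟩ := td_spec x.toNat
  have hhead : 10 ^ t.length ≤ pvV (c :: t) := pvV_le_of_head c t (hc0 (by omega)) (hdig c (by rw [hct]; simp))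
  rw [← hct, hV] at hhead
  have h1 : x.toNat ≤ 99999 := by omega
  have ht4 : t.length ≤ 4 := by
    by_contra hgt
    have : 10 ^ 5 ≤ 10 ^ t.length := Nat.pow_le_pow_right (by norm_num) (by omega)
    omega
  have hlc : (PySem.Int.toChars x).length = t.length + 1 := by
    rw [toChars_nonneg x h0, hct]; simp
  have hfin : pvV (pvSigB x) < 10 ^ 5 :=
    lt_of_lt_of_le hlt (by rw [hlen, hlc]; exact Nat.pow_le_pow_right (by norm_num) (by omega))
  have : pvV (pvSigB x) < 100000 := by omega
  exact_mod_cast this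

theorem sigA_iff_sigB (x y : Int) (hx : 13 ≤ x) (hy : 13 ≤ y) :
    pvSigA x = pvSigA y ↔ pvSigB x = pvSigB y := by
  constructor
  · intro h
    rw [sigA_eq_V x hx, sigA_eq_V y hy] at h
    exact pvV_inj_top _ _ (sigB_digits x (by omega)) (sigB_digits y (by omega))
      (sigB_head x hx) (sigB_head y hy) (by exact_mod_cast h)
  · intro h
    rw [sigA_eq_V x hx, sigA_eq_V y hy, h]

-- §3: A's trial division and B's sieve both decide the absence of a small divisor
def pvHasDiv (x : Int) : Prop := ∃ d : Int, 2 ≤ d ∧ d * d ≤ x ∧ d ∣ x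

theorem mod_beq_iff (x d : Int) : (PySem.Int.mod x d == 0) = true ↔ d ∣ x := by
  simp [PySem.Int.mod_eq_zero_iff_dvd]

theorem pvCof (x d : Int) (hx : 13 ≤ x) (h2 : 2 ≤ d) (hdvd : d ∣ x) (hlt : d < x) : pvHasDiv x := by
  obtain ⟨c, rfl⟩ := hdvd
  have hc1 : 2 ≤ c := by nlinarith
  rcases le_or_gt (d * d) (d * c) with h | h
  · exact ⟨d, h2, h, ⟨c, rfl⟩⟩
  · have hcd : c < d := by nlinarith
    exact ⟨c, hc1, by nlinarith, ⟨d, mul_comm d c⟩⟩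

theorem fLoopGo_one (x : Int) (hx : 13 ≤ x) (hnd : ¬ pvHasDiv x) :
    ∀ (f : Nat) (k : Int), 5 ≤ k → pvFLoopGo f x k = 1 := by
  intro f
  induction f with
  | zero => intro k _; rfl
  | succ f ih =>
    intro k hk
    show (if k * k ≤ x then _ else _) = 1
    split
    case isFalse => rfl
    case isTrue hkk =>
      have hknd : ¬ (k ∣ x) := fun hdvd => hnd ⟨k, by omega, hkk, hdvd⟩
      have hk2nd : ¬ ((k + 2) ∣ x) := by
        intro hdvd
        have hle : k + 2 ≤ x := Int.le_of_dvd (by omega) hdvd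
        have hne : k + 2 ≠ x := by intro he; nlinarith
        exact hnd (pvCof x (k + 2) hx (by omega) hdvd (by omega))
      rw [if_neg, ih (k + 6) (by omega)]
      simp [mod_beq_iff x k, mod_beq_iff x (k+2), hknd, hk2nd]

theorem fLoopGo_zero (x p : Int) (hx : 13 ≤ x) (hp5 : 5 ≤ p) (hpm : p % 6 = 1 ∨ p % 6 = 5)
    (hpd : p ∣ x) (hpp : p * p ≤ x) :
    ∀ (f : Nat) (k : Int), 5 ≤ k → k % 6 = 5 → k ≤ p → (p - k).toNat < f → pvFLoopGo f x k = 0 := by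
  intro f
  induction f with
  | zero => intro k _ _ _ h; omega
  | succ f ih =>
    intro k hk5 hk6 hkp hfuel
    show (if k * k ≤ x then _ else _) = 0
    rw [if_pos (by nlinarith)]
    by_cases hdvd : (PySem.Int.mod x k == 0 || PySem.Int.mod x (k + 2) == 0) = true
    · rw [if_pos hdvd]
    · rw [if_neg hdvd]
      simp only [Bool.or_eq_true, mod_beq_iff] at hdvd
      push Not at hdvd
      have hpk : p ≠ k := fun he => hdvd.1 (he ▸ hpd)
      have hpk2 : p ≠ k + 2 := fun he => hdvd.2 (he ▸ hpd)
      have hge : k + 6 ≤ p := by omega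
      exact ih (k + 6) (by omega) (by omega) hge (by omega)

theorem exists_min_prime (x : Int) (hx : 13 ≤ x) (hd : pvHasDiv x)
    (h2 : ¬ (2:Int) ∣ x) (h3 : ¬ (3:Int) ∣ x) :
    ∃ p : Int, 5 ≤ p ∧ (p % 6 = 1 ∨ p % 6 = 5) ∧ p ∣ x ∧ p * p ≤ x := by
  obtain ⟨d, hd2, hdd, hddvd⟩ := hd
  have hxn : x = (x.toNat : Int) := (Int.toNat_of_nonneg (by omega)).symm
  set n := x.toNat with hn
  have hn13 : 13 ≤ n := by omega
  have hdn : d.toNat ∣ n := by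
    have : (d.toNat : Int) ∣ (n : Int) := by
      rwa [Int.toNat_of_nonneg (by omega : (0:Int) ≤ d), ← hxn]
    exact_mod_cast this
  have hdn2 : 2 ≤ d.toNat := by omega
  have hddn : d.toNat * d.toNat ≤ n := by
    have : (d.toNat : Int) * (d.toNat : Int) ≤ (n : Int) := by
      rw [Int.toNat_of_nonneg (by omega : (0:Int) ≤ d), ← hxn]; exact hdd
    exact_mod_cast this
  have hdltn : d.toNat < n := by nlinarith
  have hnp : ¬ n.Prime := by
    intro hp
    rcases (Nat.Prime.eq_one_or_self_of_dvd hp _ hdn) with h | h <;> omega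
  have hpp : n.minFac.Prime := Nat.minFac_prime (by omega)
  have hpdvd : n.minFac ∣ n := Nat.minFac_dvd n
  have hpsq : n.minFac * n.minFac ≤ n := by
    have := Nat.minFac_sq_le_self (by omega : 0 < n) hnp
    nlinarith [this]
  have hp2 : n.minFac ≠ 2 := by
    intro he
    exact h2 (by rw [hxn]; exact_mod_cast Int.natCast_dvd_natCast.mpr (he ▸ hpdvd))
  have hp3 : n.minFac ≠ 3 := by
    intro he
    exact h3 (by rw [hxn]; exact_mod_cast Int.natCast_dvd_natCast.mpr (he ▸ hpdvd))
  have hp4 : n.minFac ≠ 4 := by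
    intro he; rw [he] at hpp; norm_num at hpp
  have hge2 := hpp.two_le
  have hp5 : 5 ≤ n.minFac := by omega
  have hnd2 : ¬ 2 ∣ n.minFac := by
    intro hdvd
    rcases (Nat.Prime.eq_one_or_self_of_dvd hpp _ hdvd) with h | h <;> omega
  have hnd3 : ¬ 3 ∣ n.minFac := by
    intro hdvd
    rcases (Nat.Prime.eq_one_or_self_of_dvd hpp _ hdvd) with h | h <;> omega
  have hm6 : n.minFac % 6 = 1 ∨ n.minFac % 6 = 5 := by omega
  refine ⟨(n.minFac : Int), by exact_mod_cast hp5, ?_, ?_, ?_⟩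
  · rcases hm6 with h | h
    · left; omega
    · right; omega
  · rw [hxn]; exact_mod_cast Int.natCast_dvd_natCast.mpr hpdvd
  · rw [hxn]; exact_mod_cast Nat.cast_le.mpr hpsq

-- A's f returns 1 exactly when x (≥ 13) has no divisor d with 2 ≤ d and d² ≤ x
theorem pvF_eq_one_iff (x : Int) (hx : 13 ≤ x) : (pvF x == 1) = true ↔ ¬ pvHasDiv x := by
  unfold pvF
  rw [if_neg (by omega : ¬ x ≤ 1), if_neg (by omega : ¬ x ≤ 3)]
  have cA : (PySem.Int.mod x 2 == 0 || PySem.Int.mod x 3 == 0) = true ↔ ((2:Int) ∣ x ∨ (3:Int) ∣ x) := by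
    rw [Bool.or_eq_true, mod_beq_iff, mod_beq_iff]
  by_cases h2 : (2:Int) ∣ x
  · rw [if_pos (cA.mpr (Or.inl h2))]
    simp only [show ((0:Int) == 1) = false by decide, Bool.false_eq_true, false_iff, not_not]
    exact ⟨2, by omega, by omega, h2⟩
  · by_cases h3 : (3:Int) ∣ x
    · rw [if_pos (cA.mpr (Or.inr h3))]
      simp only [show ((0:Int) == 1) = false by decide, Bool.false_eq_true, false_iff, not_not]
      exact ⟨3, by omega, by omega, h3⟩
    · have hAn : ¬ ((PySem.Int.mod x 2 == 0 || PySem.Int.mod x 3 == 0) = true) := by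
        intro h; rcases cA.mp h with h | h
        · exact h2 h
        · exact h3 h
      rw [if_neg hAn]
      unfold pvFLoop
      by_cases hd : pvHasDiv x
      · obtain ⟨p, hp5, hpm, hpd, hpp⟩ := exists_min_prime x hx hd h2 h3
        have hplex : p ≤ x := Int.le_of_dvd (by omega) hpd
        rw [fLoopGo_zero x p hx hp5 hpm hpd hpp _ 5 (by omega) (by omega) (by omega) (by omega)]
        simpa using hd
      · rw [fLoopGo_one x hx hd _ 5 (by omega)]
        simpa using hd

-- §3b: sieve correctness
-- 'x was crossed out by some pass d < i'
def pvCrossed (i x : Int) : Prop := ∃ d : Int, 2 ≤ d ∧ d < i ∧ d * d ≤ x ∧ d ∣ x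

theorem arr_getD {α : Type} (a : Array α) (j : Nat) (d : α) (h : j < a.size) : a.getD j d = a[j] := by
  rw [Array.getD_eq_getD_getElem?, Array.getElem?_eq_getElem h]
  rfl

theorem arr_getD_set {α : Type} (a : Array α) (i j : Nat) (v d : α) (hj : j < a.size) :
    (a.setIfInBounds i v).getD j d = if i = j then v else a.getD j d := by
  by_cases hij : i = j
  · subst hij
    rw [if_pos rfl, arr_getD _ _ _ (by simpa using hj), Array.getElem_setIfInBounds hj, if_pos rfl]
  · rw [if_neg hij, arr_getD _ _ _ (by simpa using hj), Array.getElem_setIfInBounds hj, if_neg hij,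
      arr_getD _ _ _ hj]

theorem foldl_setFalse_size (L : List Int) : ∀ s : Array Bool,
    (L.foldl (fun a j => a.setIfInBounds j.toNat false) s).size = s.size := by
  induction L with
  | nil => intro s; rfl
  | cons j L ih => intro s; rw [List.foldl_cons, ih]; simp

theorem foldl_setFalse_getD (L : List Int) : ∀ (s : Array Bool) (t : Nat), t < s.size →
    (L.foldl (fun a j => a.setIfInBounds j.toNat false) s).getD t false
      = if ∃ j ∈ L, j.toNat = t then false else s.getD t false := by
  induction L with
  | nil => intro s t _; simp
  | cons j L ih =>
    intro s t ht
    rw [List.foldl_cons, ih _ t (by simpa using ht), arr_getD_set _ _ _ _ _ ht]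
    by_cases hL : ∃ j' ∈ L, j'.toNat = t
    · obtain ⟨j', hj', hj't⟩ := hL
      rw [if_pos ⟨j', hj', hj't⟩, if_pos ⟨j', List.mem_cons_of_mem _ hj', hj't⟩]
    · by_cases hj : j.toNat = t
      · rw [if_neg hL, if_pos hj, if_pos ⟨j, by simp, hj⟩]
      · rw [if_neg hL, if_neg hj, if_neg]
        intro ⟨j', hj', hj't⟩
        rcases List.mem_cons.mp hj' with rfl | hm
        · exact hj hj't
        · exact hL ⟨j', hm, hj't⟩

theorem mark_size (s : Array Bool) (i n : Int) : (pvMark s i n).size = s.size :=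
  foldl_setFalse_size _ s

theorem mark_getD (s : Array Bool) (i n x : Int) (hi : 2 ≤ i) (hx : 0 ≤ x)
    (hxs : x.toNat < s.size) :
    (pvMark s i n).getD x.toNat false
      = if i * i ≤ x ∧ x ≤ n ∧ i ∣ x then false else s.getD x.toNat false := by
  rw [pvMark, foldl_setFalse_getD _ s x.toNat hxs]
  congr 1
  simp only [eq_iff_iff]
  constructor
  · rintro ⟨j, hj, hjx⟩
    rw [PySem.List.mem_pyRange_iff_of_pos (by omega : (0:Int) < i) j] at hj
    obtain ⟨hj1, hj2, hj3⟩ := hj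
    have hj0 : 0 ≤ j := by nlinarith
    have hjx' : j = x := by omega
    subst hjx'
    refine ⟨hj1, by omega, ?_⟩
    obtain ⟨m, hm⟩ := hj3
    exact ⟨m + i, by linarith [hm]⟩
  · rintro ⟨h1, h2, h3⟩
    refine ⟨x, ?_, rfl⟩
    rw [PySem.List.mem_pyRange_iff_of_pos (by omega : (0:Int) < i) x]
    refine ⟨h1, by omega, ?_⟩
    obtain ⟨m, hm⟩ := h3
    exact ⟨m - i, by linarith [hm]⟩

-- the loop invariant of the Eratosthenes outer loop
def pvInv (n i : Int) (s : Array Bool) : Prop :=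
  s.size = (n + 1).toNat ∧
  ∀ x : Int, 2 ≤ x → x ≤ n → (s.getD x.toNat false = true ↔ ¬ pvCrossed i x)

theorem pvInv_step (n i : Int) (s : Array Bool) (hi : 2 ≤ i) (hin : i * i ≤ n)
    (hInv : pvInv n i s) :
    pvInv n (i + 1) (if s.getD i.toNat false then pvMark s i n else s) := by
  obtain ⟨hsz, hch⟩ := hInv
  have hilen : i ≤ n := by nlinarith
  have hcross_succ : ∀ x : Int, pvCrossed (i + 1) x ↔ pvCrossed i x ∨ (i * i ≤ x ∧ i ∣ x) := by
    intro x
    constructor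
    · rintro ⟨d, hd1, hd2, hd3, hd4⟩
      rcases lt_or_ge d i with h | h
      · exact Or.inl ⟨d, hd1, h, hd3, hd4⟩
      · have : d = i := by omega
        subst this
        exact Or.inr ⟨hd3, hd4⟩
    · rintro (⟨d, hd1, hd2, hd3, hd4⟩ | ⟨h1, h2⟩)
      · exact ⟨d, hd1, by omega, hd3, hd4⟩
      · exact ⟨i, hi, by omega, h1, h2⟩
  by_cases hcur : s.getD i.toNat false = true
  · rw [if_pos hcur]
    refine ⟨by rw [mark_size, hsz], ?_⟩
    intro x hx2 hxn
    have hxsz : x.toNat < s.size := by rw [hsz]; omega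
    rw [mark_getD s i n x hi (by omega) hxsz]
    by_cases hc : i * i ≤ x ∧ x ≤ n ∧ i ∣ x
    · rw [if_pos hc]
      simp only [Bool.false_eq_true, false_iff, not_not]
      exact (hcross_succ x).mpr (Or.inr ⟨hc.1, hc.2.2⟩)
    · rw [if_neg hc, hch x hx2 hxn]
      constructor
      · intro hnc hcc
        rcases (hcross_succ x).mp hcc with h | h
        · exact hnc h
        · exact hc ⟨h.1, hxn, h.2⟩
      · intro hnc hcc
        exact hnc ((hcross_succ x).mpr (Or.inl hcc))
  · rw [if_neg hcur]
    -- i itself was crossed out, so i is composite: crossing by i adds nothing new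
    have hci : pvCrossed i i := by
      by_contra hno
      exact hcur ((hch i hi hilen).mpr hno)
    obtain ⟨e, he1, he2, he3, he4⟩ := hci
    refine ⟨hsz, ?_⟩
    intro x hx2 hxn
    rw [hch x hx2 hxn]
    constructor
    · intro hnc hcc
      rcases (hcross_succ x).mp hcc with h | h
      · exact hnc h
      · -- i ∣ x and i² ≤ x: the smaller divisor e of i also crosses x
        obtain ⟨h1, h2⟩ := h
        refine hnc ⟨e, he1, he2, by nlinarith, he4.trans h2⟩
    · intro hnc hcc
      exact hnc ((hcross_succ x).mpr (Or.inl hcc))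

theorem sieveGo_getD (n : Int) (hn : 1 ≤ n) : ∀ (fuel : Nat) (i : Int) (s : Array Bool),
    2 ≤ i → (n - i).toNat < fuel → pvInv n i s →
    ∀ x : Int, 2 ≤ x → x ≤ n →
      ((pvSieveGo fuel s i n).getD x.toNat false = true ↔ ¬ pvHasDiv x) := by
  intro fuel
  induction fuel with
  | zero => intro i s _ hf _ _ _ _; omega
  | succ fuel ih =>
    intro i s hi hf hInv x hx2 hxn
    show ((if i * i ≤ n then _ else _ : Array Bool).getD x.toNat false = true ↔ _)
    by_cases hin : i * i ≤ n
    · rw [if_pos hin]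
      have hiltn : i < n := by nlinarith
      exact ih (i + 1) _ (by omega) (by omega) (pvInv_step n i s hi hin hInv) x hx2 hxn
    · rw [if_neg hin]
      rw [hInv.2 x hx2 hxn]
      constructor
      · intro hnc hhd
        obtain ⟨d, hd1, hd2, hd3⟩ := hhd
        have hdi : d < i := by nlinarith
        exact hnc ⟨d, hd1, hdi, hd2, hd3⟩
      · intro hnd hcc
        obtain ⟨d, hd1, _, hd3, hd4⟩ := hcc
        exact hnd ⟨d, hd1, hd3, hd4⟩

theorem sieve_getD (n_max x : Int) (h13 : 13 ≤ x) (hxn : x ≤ n_max) :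
    ((pvSieve n_max).getD x.toNat false = true ↔ ¬ pvHasDiv x) := by
  have hmax : max n_max 1 = n_max := max_eq_left (by omega)
  rw [pvSieve]
  simp only [hmax]
  refine sieveGo_getD n_max (by omega) ((n_max + 1).toNat) 2 _ (by omega) (by omega) ?_ x (by omega) hxn
  constructor
  · simp
  · intro y hy2 hyn
    have hys : y.toNat < ((Array.replicate (n_max + 1).toNat true).setIfInBounds 0 false).size := by
      simp; omega
    rw [arr_getD_set _ _ _ _ _ hys, if_neg (by omega)]
    have hys' : y.toNat < (Array.replicate (n_max + 1).toNat true).size := by simp; omega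
    rw [arr_getD_set _ _ _ _ _ hys', if_neg (by omega), arr_getD _ _ _ hys', Array.getElem_replicate]
    simp only [true_iff]
    rintro ⟨d, hd1, hd2, _, _⟩
    omega

-- pointwise equality of A's and B's primality decisions
theorem prime_cond_eq (n_max x : Int) (h13 : 13 ≤ x) (hxn : x ≤ n_max) :
    (pvSieve n_max).getD x.toNat false = (pvF x == 1) := by
  have h1 := sieve_getD n_max x h13 hxn
  have h2 := pvF_eq_one_iff x h13
  rcases Bool.eq_false_or_eq_true ((pvSieve n_max).getD x.toNat false) with h | h <;>
    rcases Bool.eq_false_or_eq_true (pvF x == 1) with h' | h' <;>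
      simp_all

-- §4: grouping

def pvCntP (P : List Int) (q : Int) : Int := (P.countP (fun x => pvSigA x == q) : Int)
def pvBucket (P : List Int) (q : Int) : List Int := P.filter (fun x => pvSigA x == q)
def pvGrpCnt (P : List Int) (s : List Char) : Int := (P.countP (fun x => pvSigB x == s) : Int)
def pvGrp (P : List Int) (s : List Char) : List Int := P.filter (fun x => pvSigB x == s)
def pvFirst (P : List Int) (s : List Char) : Int := (pvGrp P s).head?.getD 0

theorem A_arrays (P : List Int) (hQ : ∀ x ∈ P, 0 ≤ pvSigA x ∧ pvSigA x < 100000) :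
    (P.foldl (fun (s : Array Int × Array (List Int)) x =>
        (s.1.setIfInBounds (pvSigA x).toNat (s.1.getD (pvSigA x).toNat 0 + 1),
         s.2.setIfInBounds (pvSigA x).toNat (s.2.getD (pvSigA x).toNat [] ++ [x])))
      (Array.replicate 100000 (0:Int), Array.replicate 100000 ([] : List Int))).1.size = 100000 ∧
    (P.foldl (fun (s : Array Int × Array (List Int)) x =>
        (s.1.setIfInBounds (pvSigA x).toNat (s.1.getD (pvSigA x).toNat 0 + 1),
         s.2.setIfInBounds (pvSigA x).toNat (s.2.getD (pvSigA x).toNat [] ++ [x])))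
      (Array.replicate 100000 (0:Int), Array.replicate 100000 ([] : List Int))).2.size = 100000 ∧
    ∀ j : Nat, j < 100000 →
      (P.foldl (fun (s : Array Int × Array (List Int)) x =>
        (s.1.setIfInBounds (pvSigA x).toNat (s.1.getD (pvSigA x).toNat 0 + 1),
         s.2.setIfInBounds (pvSigA x).toNat (s.2.getD (pvSigA x).toNat [] ++ [x])))
      (Array.replicate 100000 (0:Int), Array.replicate 100000 ([] : List Int))).1.getD j 0 = pvCntP P (j : Int) ∧
      (P.foldl (fun (s : Array Int × Array (List Int)) x =>
        (s.1.setIfInBounds (pvSigA x).toNat (s.1.getD (pvSigA x).toNat 0 + 1),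
         s.2.setIfInBounds (pvSigA x).toNat (s.2.getD (pvSigA x).toNat [] ++ [x])))
      (Array.replicate 100000 (0:Int), Array.replicate 100000 ([] : List Int))).2.getD j [] = pvBucket P (j : Int) := by
  induction P using List.reverseRecOn with
  | nil =>
    refine ⟨by simp, by simp, ?_⟩
    intro j hj
    simp only [List.foldl_nil]
    constructor
    · rw [arr_getD _ _ _ (by simpa using hj), Array.getElem_replicate]
      simp [pvCntP]
    · rw [arr_getD _ _ _ (by simpa using hj), Array.getElem_replicate]
      simp [pvBucket]
  | append_singleton P x ih =>
    obtain ⟨ih1, ih2, ih3⟩ := ih (fun y hy => hQ y (by simp [hy]))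
    obtain ⟨hq0, hq1⟩ := hQ x (by simp)
    simp only [List.foldl_append, List.foldl_cons, List.foldl_nil] at ih1 ih2 ih3 ⊢
    refine ⟨by simpa using ih1, by simpa using ih2, ?_⟩
    intro j hj
    have hqlt : (pvSigA x).toNat < 100000 := by omega
    have hcast : ((pvSigA x).toNat : Int) = pvSigA x := by omega
    constructor
    · rw [arr_getD_set _ _ _ _ _ (by rw [ih1]; omega)]
      by_cases hij : (pvSigA x).toNat = j
      · subst hij
        rw [if_pos rfl, (ih3 _ hqlt).1, hcast]
        simp only [pvCntP, List.countP_append, List.countP_cons, List.countP_nil,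
          beq_self_eq_true, cond_true]
        push_cast
        omega
      · rw [if_neg hij, (ih3 j hj).1]
        have hne : pvSigA x ≠ ((j : Nat) : Int) := by omega
        simp [pvCntP, List.countP_append, List.countP_cons, hne]
    · rw [arr_getD_set _ _ _ _ _ (by rw [ih2]; omega)]
      by_cases hij : (pvSigA x).toNat = j
      · subst hij
        rw [if_pos rfl, (ih3 _ hqlt).2, hcast]
        simp [pvBucket, List.filter_append]
      · rw [if_neg hij, (ih3 j hj).2]
        have hne : pvSigA x ≠ ((j : Nat) : Int) := by omega
        simp [pvBucket, List.filter_append, hne]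

theorem B_keys (P : List Int) :
    (P.foldl (fun (g : PySem.Dict (List Char) (Int × Int)) x =>
        g.insert (pvSigB x) ((g.getD (pvSigB x) (0, x)).1 + 1, (g.getD (pvSigB x) (0, x)).2))
      PySem.Dict.empty).keys = PySem.Set.ofList (P.map pvSigB) := by
  rw [PySem.Dict.keys_foldl_insert_key P pvSigB
    (fun g x => ((g.getD (pvSigB x) (0, x)).1 + 1, (g.getD (pvSigB x) (0, x)).2)) PySem.Dict.empty]
  rfl

theorem B_nodup (P : List Int) :
    (P.foldl (fun (g : PySem.Dict (List Char) (Int × Int)) x =>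
        g.insert (pvSigB x) ((g.getD (pvSigB x) (0, x)).1 + 1, (g.getD (pvSigB x) (0, x)).2))
      PySem.Dict.empty).keys.Nodup := by
  exact PySem.Dict.nodup_keys_foldl_insert_key P pvSigB _ PySem.Dict.empty
    (by simpa using PySem.Dict.nodup_keys_empty (κ := List Char) (ν := Int × Int))

theorem B_getD (P : List Int) :
    ∀ s ∈ P.map pvSigB,
      (P.foldl (fun (g : PySem.Dict (List Char) (Int × Int)) x =>
          g.insert (pvSigB x) ((g.getD (pvSigB x) (0, x)).1 + 1, (g.getD (pvSigB x) (0, x)).2))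
        PySem.Dict.empty).getD s (0, 0) = (pvGrpCnt P s, pvFirst P s) := by
  induction P using List.reverseRecOn with
  | nil => simp
  | append_singleton P x ih =>
    intro s hs
    simp only [List.foldl_append, List.foldl_cons, List.foldl_nil]
    set gP : PySem.Dict (List Char) (Int × Int) :=
      P.foldl (fun (g : PySem.Dict (List Char) (Int × Int)) x =>
          g.insert (pvSigB x) ((g.getD (pvSigB x) (0, x)).1 + 1, (g.getD (pvSigB x) (0, x)).2))
        PySem.Dict.empty with hgP
    rw [PySem.Dict.getD_insert]
    by_cases hss : s = pvSigB x
    · rw [if_pos hss, ← hss]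
      have hxs : (pvSigB x == s) = true := by simp [hss]
      by_cases hmem : s ∈ P.map pvSigB
      · have hkey : s ∈ gP.keys := by
          rw [hgP, B_keys]; exact (PySem.Set.mem_ofList _ _).mpr hmem
        obtain ⟨v, hv⟩ : ∃ v, gP.get? s = some v := by
          cases hg : gP.get? s with
          | none =>
            rw [PySem.Dict.get?_eq_none_iff_not_mem_keys] at hg
            exact absurd hkey hg
          | some v => exact ⟨v, rfl⟩
        rw [PySem.Dict.getD_of_get?_eq_some gP (0, x) hv]
        have hIH : v = (pvGrpCnt P s, pvFirst P s) := by
          rw [← PySem.Dict.getD_of_get?_eq_some gP (0, 0) hv, hgP]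
          exact ih s hmem
        rw [hIH]
        obtain ⟨y, hyP, hys⟩ := List.mem_map.mp hmem
        have hgrp : y ∈ pvGrp P s := by
          rw [pvGrp, List.mem_filter]
          exact ⟨hyP, by simp [hys]⟩
        have h1 : pvGrpCnt P s + 1 = pvGrpCnt (P ++ [x]) s := by
          simp only [pvGrpCnt, List.countP_append, List.countP_cons, List.countP_nil, hxs,
            cond_true]
          push_cast; omega
        have h2 : pvFirst P s = pvFirst (P ++ [x]) s := by
          rw [pvFirst, pvFirst, pvGrp, pvGrp, List.filter_append]
          cases hG : P.filter (fun y => pvSigB y == s) with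
          | nil => rw [pvGrp, hG] at hgrp; simp at hgrp
          | cons a t => simp
        rw [← h1, ← h2]
      · have hnc : gP.contains s = false := by
          rw [← Bool.not_eq_true, PySem.Dict.contains_iff_mem_keys, hgP, B_keys]
          simpa [PySem.Set.mem_ofList] using hmem
        rw [PySem.Dict.getD_of_not_contains gP (0, x) hnc]
        simp only [Prod.mk.injEq]
        have hgrp0 : P.filter (fun y => pvSigB y == s) = [] := by
          rw [List.filter_eq_nil_iff]
          intro y hy
          simp only [beq_iff_eq]
          intro he
          exact hmem (List.mem_map.mpr ⟨y, hy, he⟩)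
        have hcnt0 : P.countP (fun y => pvSigB y == s) = 0 := by
          rw [List.countP_eq_length_filter, hgrp0]
          rfl
        constructor
        · simp [pvGrpCnt, List.countP_append, List.countP_cons, hcnt0, hxs]
        · simp [pvFirst, pvGrp, List.filter_append, hgrp0, hxs]
    · rw [if_neg hss]
      have hmem : s ∈ P.map pvSigB := by
        obtain ⟨y, hy, hye⟩ := List.mem_map.mp hs
        rcases List.mem_append.mp hy with h | h
        · exact List.mem_map.mpr ⟨y, h, hye⟩
        · simp only [List.mem_singleton] at h
          subst h
          exact absurd hye.symm hss
      rw [ih s hmem]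
      have hxne : (pvSigB x == s) = false := by
        simp only [beq_eq_false_iff_ne]
        exact fun he => hss he.symm
      have h1 : pvGrpCnt (P ++ [x]) s = pvGrpCnt P s := by
        simp [pvGrpCnt, List.countP_append, List.countP_cons, hxne]
      have h2 : pvFirst (P ++ [x]) s = pvFirst P s := by
        simp [pvFirst, pvGrp, List.filter_append, hxne]
      rw [h1, h2]

theorem pairwise_le_getLast (l : List Int) (h : l.Pairwise (· ≤ ·)) :
    ∀ y ∈ l, ∀ M, l.getLast? = some M → y ≤ M := by
  induction l with
  | nil => simp
  | cons a t ih =>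
    intro y hy M hM
    cases t with
    | nil =>
      simp at hy hM
      omega
    | cons b u =>
      rw [List.getLast?_cons_cons] at hM
      rcases List.mem_cons.mp hy with rfl | hy'
      · have hM' : M ∈ b :: u := by
          have := List.mem_of_getLast? hM
          exact this
        exact (List.pairwise_cons.mp h).1 M hM'
      · exact ih (List.pairwise_cons.mp h).2 y hy' M hM

theorem sorted_min_eq (l l' : List Int) (hp : l.Perm l') (hne : l ≠ []) :
    (PySem.List.pyGet? (PySem.List.sorted l (fun v => v) false) 0).getD 0
      = (PySem.List.min? l' (fun v => v)).getD 0 := by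
  have hsne : PySem.List.sorted l (fun v => v) false ≠ [] := by
    rw [Ne, PySem.List.sorted_eq_nil_iff]; exact hne
  obtain ⟨m, t, hsort⟩ : ∃ m t, PySem.List.sorted l (fun v => v) false = m :: t := by
    cases h : PySem.List.sorted l (fun v => v) false with
    | nil => exact absurd h hsne
    | cons m t => exact ⟨m, t, rfl⟩
  obtain ⟨mb, hmb⟩ : ∃ mb, PySem.List.min? l' (fun v => v) = some mb := by
    cases h : PySem.List.min? l' (fun v => v) with
    | none =>
      rw [PySem.List.min?_eq_none_iff] at h
      subst h
      exact absurd (List.Perm.eq_nil hp) hne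
    | some mb => exact ⟨mb, rfl⟩
  rw [hsort, PySem.List.pyGet?_zero_cons, hmb]
  have h1 : ∀ y ∈ l, m ≤ y := PySem.List.key_head_sorted_le l (fun v => v) hsort
  have h2 : mb ∈ l := hp.mem_iff.mpr (PySem.List.min?_mem hmb)
  have h3 : m ∈ l := by
    rw [← PySem.List.mem_sorted l (fun v => v) false, hsort]
    simp
  have h4 : mb ≤ m := PySem.List.min?_isMin hmb m (hp.mem_iff.mp h3)
  simp only [Option.getD_some]
  exact le_antisymm (h1 mb h2) h4

theorem sorted_max_eq (l l' : List Int) (hp : l.Perm l') (hne : l ≠ []) :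
    (PySem.List.pyGet? (PySem.List.sorted l (fun v => v) false)
        (((PySem.List.sorted l (fun v => v) false).length : Int) - 1)).getD 0
      = (PySem.List.max? l' (fun v => v)).getD 0 := by
  have hlen : (PySem.List.sorted l (fun v => v) false).length = l.length :=
    PySem.List.length_sorted l (fun v => v) false
  have hpos : 0 < l.length := List.length_pos_iff.mpr hne
  obtain ⟨M, hM⟩ : ∃ M, (PySem.List.sorted l (fun v => v) false).getLast? = some M := by
    cases h : (PySem.List.sorted l (fun v => v) false).getLast? with
    | none =>
      rw [List.getLast?_eq_none_iff] at h
      rw [PySem.List.sorted_eq_nil_iff] at h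
      exact absurd h hne
    | some M => exact ⟨M, rfl⟩
  obtain ⟨Mb, hMb⟩ : ∃ Mb, PySem.List.max? l' (fun v => v) = some Mb := by
    cases h : PySem.List.max? l' (fun v => v) with
    | none =>
      rw [PySem.List.max?_eq_none_iff] at h
      subst h
      exact absurd (List.Perm.eq_nil hp) hne
    | some Mb => exact ⟨Mb, rfl⟩
  have hidx : PySem.List.pyGet? (PySem.List.sorted l (fun v => v) false)
      (((PySem.List.sorted l (fun v => v) false).length : Int) - 1) = some M := by
    rw [PySem.List.pyGet?_of_nonneg _ (by rw [hlen]; omega)]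
    have htn : ((PySem.List.sorted l (fun v => v) false).length - 1 : Int).toNat
        = (PySem.List.sorted l (fun v => v) false).length - 1 := by
      rw [hlen]; omega
    rw [htn, ← List.getLast?_eq_getElem?]
    exact hM
  rw [hidx, hMb]
  simp only [Option.getD_some]
  have h1 : ∀ y ∈ l, y ≤ M := by
    intro y hy
    refine pairwise_le_getLast _ ?_ y ?_ M hM
    · exact PySem.List.sorted_pairwise l (fun v => v)
    · rw [PySem.List.mem_sorted]; exact hy
  have h2 : M ∈ l := by
    rw [← PySem.List.mem_sorted l (fun v => v) false]
    exact List.mem_of_getLast? hM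
  have h3 : Mb ∈ l := hp.mem_iff.mpr (PySem.List.max?_mem hMb)
  have h4 : M ≤ Mb := PySem.List.max?_isMax hMb M (hp.mem_iff.mp h2)
  exact le_antisymm h4 (h1 Mb h3)

theorem core_perm (P : List Int) (k : Int) (hk : k + 1 ≠ 0)
    (hP : ∀ x ∈ P, 13 ≤ x ∧ x ≤ 99999) :
    (((PySem.List.pyRange 0 100000 1).filter (fun q => pvCntP P q == k + 1)).map
        (fun q => (pvBucket P q).head?.getD 0)).Perm
      (((PySem.Set.ofList (P.map pvSigB)).filter (fun s => pvGrpCnt P s == k + 1)).map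
        (fun s => pvFirst P s)) := by
  have hF0 : ∀ x ∈ P, pvSigA x = pvIntOfDigits (pvSigB x) := by
    intro x hx
    rw [sigA_eq_V x (hP x hx).1, intOfDigits_eq_V _ (sigB_digits x (by have := (hP x hx).1; omega))]
  have hwit : ∀ s ∈ PySem.Set.ofList (P.map pvSigB), ∃ x ∈ P, pvSigB x = s := by
    intro s hs
    exact List.mem_map.mp ((PySem.Set.mem_ofList _ _).mp hs)
  -- pointwise transfer between the numeric key and the string key
  have hF2 : ∀ s ∈ PySem.Set.ofList (P.map pvSigB), ∀ x0 ∈ P, pvSigB x0 = s →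
      (∀ x ∈ P, (pvSigA x == pvIntOfDigits s) = (pvSigB x == s)) := by
    intro s _ x0 hx0 hx0s x hx
    have he : pvIntOfDigits s = pvSigA x0 := by rw [← hx0s, ← hF0 x0 hx0]
    by_cases h : pvSigB x = s
    · have : pvSigA x = pvSigA x0 :=
        (sigA_iff_sigB x x0 (hP x hx).1 (hP x0 hx0).1).mpr (by rw [h, hx0s])
      simp [he, this, h]
    · have : pvSigA x ≠ pvSigA x0 := by
        intro hc
        exact h (by rw [← hx0s]; exact (sigA_iff_sigB x x0 (hP x hx).1 (hP x0 hx0).1).mp hc)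
      simp [he, this, h]
  have hperm : ((PySem.List.pyRange 0 100000 1).filter (fun q => pvCntP P q == k + 1)).Perm
      (((PySem.Set.ofList (P.map pvSigB)).filter (fun s => pvGrpCnt P s == k + 1)).map pvIntOfDigits) := by
    rw [List.perm_ext_iff_of_nodup]
    · intro q
      constructor
      · intro hq
        obtain ⟨hqr, hqc⟩ := List.mem_filter.mp hq
        have hqc' : pvCntP P q = k + 1 := by simpa using hqc
        have hpos : 0 < P.countP (fun x => pvSigA x == q) := by
          rcases Nat.eq_zero_or_pos (P.countP (fun x => pvSigA x == q)) with h | h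
          · exfalso; apply hk; rw [← hqc', pvCntP, h]; rfl
          · exact h
        obtain ⟨x, hx, hxq⟩ := List.countP_pos_iff.mp hpos
        have hxq' : pvSigA x = q := by simpa using hxq
        have hsmem : pvSigB x ∈ PySem.Set.ofList (P.map pvSigB) :=
          (PySem.Set.mem_ofList _ _).mpr (List.mem_map.mpr ⟨x, hx, rfl⟩)
        refine List.mem_map.mpr ⟨pvSigB x, List.mem_filter.mpr ⟨hsmem, ?_⟩, ?_⟩
        · have hcnteq : pvGrpCnt P (pvSigB x) = pvCntP P q := by
            rw [pvGrpCnt, pvCntP, ← hxq']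
            congr 1
            refine (List.countP_congr ?_).symm
            intro y hy
            rw [hF0 x hx]
            rw [hF2 (pvSigB x) hsmem x hx rfl y hy]
          simp [hcnteq, hqc']
        · rw [← hF0 x hx, hxq']
      · intro hq
        obtain ⟨s, hsf, hse⟩ := List.mem_map.mp hq
        obtain ⟨hsS, hsc⟩ := List.mem_filter.mp hsf
        obtain ⟨x0, hx0, hx0s⟩ := hwit s hsS
        have he : pvIntOfDigits s = pvSigA x0 := by rw [← hx0s, ← hF0 x0 hx0]
        have hb := hP x0 hx0
        have hcnteq : pvCntP P q = pvGrpCnt P s := by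
          rw [← hse, he, pvGrpCnt, pvCntP]
          congr 1
          refine List.countP_congr ?_
          intro y hy
          rw [← he] at *
          rw [hF2 s hsS x0 hx0 hx0s y hy]
        refine List.mem_filter.mpr ⟨?_, ?_⟩
        · rw [PySem.List.mem_pyRange_one, ← hse, he]
          exact ⟨sigA_nonneg x0 hb.1, sigA_lt x0 hb.1 hb.2⟩
        · simpa [hcnteq] using hsc
    · exact (PySem.List.nodup_pyRange_one 0 100000).filter _
    · refine ((PySem.Set.nodup_ofList _).filter _).map_on ?_
      intro s hs t ht he
      obtain ⟨x0, hx0, hx0s⟩ := hwit s (List.mem_filter.mp hs).1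
      obtain ⟨y0, hy0, hy0t⟩ := hwit t (List.mem_filter.mp ht).1
      have : pvSigA x0 = pvSigA y0 := by
        rw [hF0 x0 hx0, hF0 y0 hy0, hx0s, hy0t]
        exact he
      rw [← hx0s, ← hy0t]
      exact (sigA_iff_sigB x0 y0 (hP x0 hx0).1 (hP y0 hy0).1).mp this
  refine hperm.map (fun q => (pvBucket P q).head?.getD 0) |>.trans ?_
  rw [List.map_map]
  refine List.Perm.of_eq (List.map_congr_left ?_)
  intro s hsf
  obtain ⟨hsS, _⟩ := List.mem_filter.mp hsf
  obtain ⟨x0, hx0, hx0s⟩ := hwit s hsS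
  have hbg : pvBucket P (pvIntOfDigits s) = pvGrp P s := by
    rw [pvBucket, pvGrp]
    refine List.filter_congr ?_
    intro y hy
    exact hF2 s hsS x0 hx0 hx0s y hy
  simp only [Function.comp]
  rw [hbg]
  rfl

-- §5: main
set_option maxRecDepth 4096 in
theorem main_equiv : ∀ (n_max : Int) (k_perms : Int), Pre_permutational_primes n_max k_perms →
    permutational_primes n_max k_perms = permutational_primes_alt n_max k_perms := by
  intro n k hpre
  obtain ⟨hn, hk⟩ := hpre
  have hkne : k + 1 ≠ 0 := fun h => hk (by omega)
  rw [permutational_primes, permutational_primes_alt]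
  simp only [PySem.List.foldl_if_eq_foldl_filter]
  set P := List.filter (fun x => pvF x == 1) (PySem.List.pyRange 13 (n + 1)) with hPdef
  have hPprop : ∀ x ∈ P, 13 ≤ x ∧ x ≤ 99999 := by
    intro x hx
    rw [hPdef] at hx
    obtain ⟨hxr, hxf⟩ := List.mem_filter.mp hx
    rw [PySem.List.mem_pyRange_one] at hxr
    refine ⟨hxr.1, ?_⟩
    by_contra hgt
    have hx3 : x = 100000 ∨ x = 100001 ∨ x = 100002 := by omega
    rcases hx3 with rfl | rfl | rfl
    · exact absurd (by simpa using hxf) (by decide : ¬ pvF 100000 = 1)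
    · exact absurd (by simpa using hxf) (by decide : ¬ pvF 100001 = 1)
    · exact absurd (by simpa using hxf) (by decide : ¬ pvF 100002 = 1)
  have hQ : ∀ x ∈ P, 0 ≤ pvSigA x ∧ pvSigA x < 100000 := by
    intro x hx
    obtain ⟨h1, h2⟩ := hPprop x hx
    exact ⟨sigA_nonneg x h1, sigA_lt x h1 h2⟩
  obtain ⟨hs1, hs2, hchar⟩ := A_arrays P hQ
  rw [hs1]
  have hcast100000 : ((100000 : Nat) : Int) = 100000 := by norm_num
  rw [hcast100000]
  -- second loop: replace the array lookups by their characterisation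
  have hfiltereq : List.filter (fun q =>
        (P.foldl (fun (s : Array Int × Array (List Int)) x =>
            (s.1.setIfInBounds (pvSigA x).toNat (s.1.getD (pvSigA x).toNat 0 + 1),
             s.2.setIfInBounds (pvSigA x).toNat (s.2.getD (pvSigA x).toNat [] ++ [x])))
          (Array.replicate 100000 (0:Int), Array.replicate 100000 ([] : List Int))).1.getD q.toNat 0 == k + 1)
      (PySem.List.pyRange 0 100000)
      = List.filter (fun q => pvCntP P q == k + 1) (PySem.List.pyRange 0 100000) := by
    refine List.filter_congr ?_
    intro q hq
    rw [PySem.List.mem_pyRange_one] at hq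
    have hqn : q.toNat < 100000 := by omega
    rw [(hchar q.toNat hqn).1]
    have : ((q.toNat : Nat) : Int) = q := by omega
    rw [this]
  rw [hfiltereq]
  have hbodyeq : List.foldl (fun (acc : List Int × Int) (x : Int) =>
        (acc.1 ++ [(PySem.List.pyGet?
            ((P.foldl (fun (s : Array Int × Array (List Int)) x =>
                (s.1.setIfInBounds (pvSigA x).toNat (s.1.getD (pvSigA x).toNat 0 + 1),
                 s.2.setIfInBounds (pvSigA x).toNat (s.2.getD (pvSigA x).toNat [] ++ [x])))
              (Array.replicate 100000 (0:Int), Array.replicate 100000 ([] : List Int))).2.getD x.toNat [])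
            0).getD 0], acc.2 + 1))
      ([], 0) (List.filter (fun q => pvCntP P q == k + 1) (PySem.List.pyRange 0 100000))
      = List.foldl (fun (acc : List Int × Int) (x : Int) =>
          (acc.1 ++ [(pvBucket P x).head?.getD 0], acc.2 + 1))
        ([], 0) (List.filter (fun q => pvCntP P q == k + 1) (PySem.List.pyRange 0 100000)) := by
    refine PySem.List.foldl_congr_mem _ _ _ _ ?_
    intro acc q hq
    have hqr : q ∈ PySem.List.pyRange 0 100000 := (List.mem_filter.mp hq).1
    rw [PySem.List.mem_pyRange_one] at hqr
    have hqn : q.toNat < 100000 := by omega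
    rw [(hchar q.toNat hqn).2]
    have hcq : ((q.toNat : Nat) : Int) = q := by omega
    rw [hcq, PySem.List.pyGet?_zero]
    rw [← List.head?_eq_getElem?]
  rw [hbodyeq]
  rw [PySem.List.foldl_prod_mk (f := fun (a : List Int) (x : Int) => a ++ [(pvBucket P x).head?.getD 0])
      (g := fun (a : Int) (_ : Int) => a + 1)]
  rw [PySem.List.foldl_append_singleton_eq_map]
  have hcount : List.foldl (fun (a : Int) (_ : Int) => a + 1) 0
      (List.filter (fun q => pvCntP P q == k + 1) (PySem.List.pyRange 0 100000))
      = ((List.filter (fun q => pvCntP P q == k + 1) (PySem.List.pyRange 0 100000)).length : Int) := by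
    rw [PySem.List.foldl_add (g := fun _ => (1:Int)), PySem.List.sum_map_const_int]
    push_cast
    ring
  rw [hcount]
  -- B side: the sieve decides exactly what A's f decides
  have hfilterB : List.filter (fun x => (pvSieve n).getD x.toNat false) (PySem.List.pyRange 13 (n + 1)) = P := by
    rw [hPdef]
    refine List.filter_congr ?_
    intro x hx
    rw [PySem.List.mem_pyRange_one] at hx
    exact prime_cond_eq n x hx.1 (by omega)
  rw [hfilterB]
  rw [PySem.Dict.values_eq_map_keys _ (B_nodup P) ((0 : Int), (0 : Int)), B_keys P]
  rw [List.filter_map, List.map_map]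
  set S := PySem.Set.ofList (P.map pvSigB) with hSdef
  have hfilterS : List.filter ((fun (p : Int × Int) => p.1 == k + 1) ∘ fun s =>
        (P.foldl (fun (g : PySem.Dict (List Char) (Int × Int)) x =>
            g.insert (pvSigB x) ((g.getD (pvSigB x) (0, x)).1 + 1, (g.getD (pvSigB x) (0, x)).2))
          PySem.Dict.empty).getD s (0, 0)) S
      = List.filter (fun s => pvGrpCnt P s == k + 1) S := by
    refine List.filter_congr ?_
    intro s hs
    have hsm : s ∈ P.map pvSigB := (PySem.Set.mem_ofList _ _).mp hs
    simp only [Function.comp]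
    rw [B_getD P s hsm]
  rw [hfilterS]
  have hmapS : List.map ((fun (p : Int × Int) => p.2) ∘ fun s =>
        (P.foldl (fun (g : PySem.Dict (List Char) (Int × Int)) x =>
            g.insert (pvSigB x) ((g.getD (pvSigB x) (0, x)).1 + 1, (g.getD (pvSigB x) (0, x)).2))
          PySem.Dict.empty).getD s (0, 0))
        (List.filter (fun s => pvGrpCnt P s == k + 1) S)
      = List.map (fun s => pvFirst P s) (List.filter (fun s => pvGrpCnt P s == k + 1) S) := by
    refine List.map_congr_left ?_
    intro s hs
    have hsm : s ∈ P.map pvSigB := (PySem.Set.mem_ofList _ _).mp (List.mem_filter.mp hs).1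
    simp only [Function.comp]
    rw [B_getD P s hsm]
  rw [hmapS]
  -- the permutation between the two collected lists
  have hperm := core_perm P k hkne hPprop
  rw [← hSdef] at hperm
  set frqA := List.map (fun q => (pvBucket P q).head?.getD 0)
      (List.filter (fun q => pvCntP P q == k + 1) (PySem.List.pyRange 0 100000)) with hfrqA
  set firsts := List.map (fun s => pvFirst P s)
      (List.filter (fun s => pvGrpCnt P s == k + 1) S) with hfirsts
  have hlen : frqA.length = firsts.length := hperm.length_eq
  have hlenA : (List.filter (fun q => pvCntP P q == k + 1) (PySem.List.pyRange 0 100000)).length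
      = frqA.length := by rw [hfrqA, List.length_map]
  rw [hlenA, hlen]
  by_cases hempty : firsts = []
  · rw [hempty]
    simp only [List.length_nil, List.isEmpty_nil, Nat.cast_zero, beq_self_eq_true, if_true]
  · have hA : ((firsts.length : Int) == 0) = false := by
      have : firsts.length ≠ 0 := fun h => hempty (List.eq_nil_of_length_eq_zero h)
      simp only [beq_eq_false_iff_ne]
      omega
    have hB : firsts.isEmpty = false := by
      rw [List.isEmpty_eq_false_iff]
      exact hempty
    rw [hA, hB]
    simp only [Bool.false_eq_true, if_false]
    have hneA : frqA ≠ [] := by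
      intro h
      apply hempty
      have := hperm.symm
      rw [h] at this
      exact this.eq_nil
    simp only [PySem.List.len_eq, List.nil_append]
    rw [sorted_min_eq frqA firsts hperm hneA, sorted_max_eq frqA firsts hperm hneA]

-- ===== VERDICT (by name: the statement is the Claim_ definition above) =====
theorem permutational_primes_spec : Claim_equal_permutational_primes := by
  intro n k _ hpre
  unfold Spec_permutational_primes
  exact main_equiv n k hpre
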